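-- pv_equiv track=rewrite | github.com/dmlerner/grind75plus | 20.2-chemistry.py | get_numeric_token
-- ===== SOURCE A (Python) =====
-- class Character:
--     OPEN = "("
--     CLOSE = ")"
--     DIGIT = set(map(str, range(10)))
--     LOWERCASE = set("abcdefghijklmnopqrstuvwxyz")
--     UPPERCASE = set("abcdefghijklmnopqrstuvwxyz".upper())
--
-- def get_numeric_token(s, i):
--     assert s[i] in Character.DIGIT
--     digits = []
--     while i < len(s) and s[i] in Character.DIGIT:
--         digits.append(s[i])
--         i += 1
--     digits = int("".join(digits))
--     return digits, i
-- ===== SOURCE B (Python) =====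
-- def get_numeric_token(s, i):
--     assert '0' <= s[i] <= '9'
--     value = 0
--     while i < len(s) and '0' <= s[i] <= '9':
--         value = value * 10 + (ord(s[i]) - ord('0'))
--         i += 1
--     return value, i
-- ===== Notes on version B (the rewrite author's own statement) =====
-- stated objective: simpler
-- what changed: B accumulates the integer value directly (value = value*10 + digit) while scanning, instead of collecting the digit characters in a list and converting via int(''.join(...)) afterwards; the digit test becomes a plain character-range comparison instead of a set of one-character strings.
import Mathlib
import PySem

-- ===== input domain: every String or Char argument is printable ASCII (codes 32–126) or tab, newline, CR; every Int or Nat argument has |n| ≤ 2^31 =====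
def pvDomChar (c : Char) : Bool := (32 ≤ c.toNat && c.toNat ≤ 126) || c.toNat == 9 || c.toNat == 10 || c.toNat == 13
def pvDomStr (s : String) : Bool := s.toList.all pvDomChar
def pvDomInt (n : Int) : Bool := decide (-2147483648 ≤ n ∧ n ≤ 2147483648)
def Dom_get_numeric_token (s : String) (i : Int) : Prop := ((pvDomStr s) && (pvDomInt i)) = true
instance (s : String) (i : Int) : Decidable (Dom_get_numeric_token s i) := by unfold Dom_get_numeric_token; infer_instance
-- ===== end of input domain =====

-- B replaces A's digit-list + int(''.join(...)) conversion by a running integer accumulator (simpler; same cost).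

-- ===== PORT A =====
-- Character.DIGIT, at the level of single characters (s[i] is a 1-char string in Python)
def pvDigitChars : List Char := ['0','1','2','3','4','5','6','7','8','9']

-- the while loop of A: collects the digit characters, advancing i
def getNumericLoopA (s : List Char) (i : Int) (digits : List Char) : List Char × Int :=
  if h : i < (s.length : Int) then
    match PySem.List.pyGet? s i with
    | some c =>
      if c ∈ pvDigitChars then getNumericLoopA s (i + 1) (digits ++ [c]) else (digits, i)
    | none => (digits, i)  -- Python would raise IndexError; unreachable from a start index admitted by Pre_
  else (digits, i)
termination_by ((s.length : Int) - i).toNat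
decreasing_by omega

-- hand port of Python's int("".join(digits)) for this call site: exact whenever digits is a
-- nonempty list of ASCII digit characters, which is always the case for the list collected by
-- the loop under Pre_ (Python's int would raise ValueError on the empty string, unreachable here)
def pyIntOfDigitStr (ds : List Char) : Int :=
  if ds ≠ [] ∧ ds.all (fun c => decide ('0' ≤ c) && decide (c ≤ '9')) then
    ds.foldl (fun a c => a * 10 + ((c.toNat : Int) - 48)) 0
  else 0

def get_numeric_token (s : String) (i : Int) : Int × Int :=
  -- assert s[i] in Character.DIGIT: raises where Pre_ fails, value unaffected where it holds
  let r := getNumericLoopA s.toList i []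
  (pyIntOfDigitStr r.1, r.2)

-- ===== PORT B =====
-- the while loop of B: maintains the running integer value, advancing i
def getNumericLoopB (s : List Char) (i : Int) (value : Int) : Int × Int :=
  if h : i < (s.length : Int) then
    match PySem.List.pyGet? s i with
    | some c =>
      if '0' ≤ c ∧ c ≤ '9' then getNumericLoopB s (i + 1) (value * 10 + ((c.toNat : Int) - 48))
      else (value, i)
    | none => (value, i)  -- Python would raise IndexError; unreachable from a start index admitted by Pre_
  else (value, i)
termination_by ((s.length : Int) - i).toNat
decreasing_by omega

def get_numeric_token_alt (s : String) (i : Int) : Int × Int :=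
  -- assert '0' <= s[i] <= '9': raises where Pre_ fails, value unaffected where it holds
  getNumericLoopB s.toList i 0

-- ===== PRECONDITION & SPEC =====
-- Pre_: s[i] is a valid (possibly negative) Python index and the character there is a digit;
-- otherwise both A and B raise (IndexError / AssertionError).
def Pre_get_numeric_token (s : String) (i : Int) : Prop :=
  ((PySem.List.pyGet? s.toList i).any (fun c => decide ('0' ≤ c) && decide (c ≤ '9'))) = true
instance (s : String) (i : Int) : Decidable (Pre_get_numeric_token s i) := by
  unfold Pre_get_numeric_token; infer_instance

def pvWitness_get_numeric_token : String × Int := ("12a", 0)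

def Spec_get_numeric_token (s : String) (i : Int) (out : Int × Int) : Prop := out = get_numeric_token_alt s i
instance (s : String) (i : Int) (out : Int × Int) : Decidable (Spec_get_numeric_token s i out) := by unfold Spec_get_numeric_token; infer_instance

-- ===== CLAIM (what is proved, stated in full; the proofs are below) =====
def Claim_equal_get_numeric_token : Prop := ∀ (s : String) (i : Int), Dom_get_numeric_token s i → Pre_get_numeric_token s i → Spec_get_numeric_token s i (get_numeric_token s i)

-- ===== LEMMAS AND PROOFS =====

theorem mem_pvDigitChars_iff (c : Char) : c ∈ pvDigitChars ↔ ('0' ≤ c ∧ c ≤ '9') := by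
  constructor
  · intro h
    simp [pvDigitChars] at h
    rcases h with rfl|rfl|rfl|rfl|rfl|rfl|rfl|rfl|rfl|rfl <;> exact ⟨by decide, by decide⟩
  · rintro ⟨h1, h2⟩
    have h1' : 48 ≤ c.toNat := h1
    have h2' : c.toNat ≤ 57 := h2
    have hc : c = Char.ofNat c.toNat := (Char.ofNat_toNat c).symm
    interval_cases h : c.toNat <;> simp [pvDigitChars, hc, h]

-- B's loop on accumulator (ds.foldl f 0) computes the fold of A's collected list, with the same end index
theorem loop_agree (s : List Char) (i : Int) (ds : List Char) :
    getNumericLoopB s i (ds.foldl (fun a c => a * 10 + ((c.toNat : Int) - 48)) 0)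
      = ((getNumericLoopA s i ds).1.foldl (fun a c => a * 10 + ((c.toNat : Int) - 48)) 0,
         (getNumericLoopA s i ds).2) := by
  induction i, ds using getNumericLoopA.induct s with
  | case1 i ds h c hget hdig ih =>
    rw [getNumericLoopA, getNumericLoopB]
    simp only [dif_pos h, hget, if_pos ((mem_pvDigitChars_iff c).mp hdig), if_pos hdig]
    simp only [List.foldl_append, List.foldl_cons, List.foldl_nil] at ih
    exact ih
  | case2 i ds h c hget hdig =>
    rw [getNumericLoopA, getNumericLoopB]
    simp only [dif_pos h, hget, if_neg ((fun hc => hdig ((mem_pvDigitChars_iff c).mpr hc))),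
      if_neg hdig]
  | case3 i ds h hget =>
    rw [getNumericLoopA, getNumericLoopB]
    simp only [dif_pos h, hget]
  | case4 i ds h =>
    rw [getNumericLoopA, getNumericLoopB]
    simp only [dif_neg h]

-- A's loop only appends digit characters to ds
theorem loopA_prefix (s : List Char) (i : Int) (ds : List Char) :
    ∃ t, (getNumericLoopA s i ds).1 = ds ++ t ∧
      t.all (fun c => decide ('0' ≤ c) && decide (c ≤ '9')) = true := by
  induction i, ds using getNumericLoopA.induct s with
  | case1 i ds h c hget hdig ih =>
    obtain ⟨t, ht, hall⟩ := ih
    refine ⟨c :: t, ?_, ?_⟩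
    · rw [getNumericLoopA]; simp only [dif_pos h, hget, if_pos hdig, ht, List.append_assoc,
        List.singleton_append]
    · obtain ⟨h1, h2⟩ := (mem_pvDigitChars_iff c).mp hdig
      simp [hall, h1, h2]
  | case2 i ds h c hget hdig =>
    exact ⟨[], by rw [getNumericLoopA]; simp [dif_pos h, hget, hdig], rfl⟩
  | case3 i ds h hget =>
    exact ⟨[], by rw [getNumericLoopA]; simp [dif_pos h, hget], rfl⟩
  | case4 i ds h =>
    exact ⟨[], by rw [getNumericLoopA]; simp [dif_neg h], rfl⟩

theorem pyGet?_some_lt {s : List Char} {i : Int} {c : Char}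
    (h : PySem.List.pyGet? s i = some c) : i < (s.length : Int) := by
  simp [PySem.List.pyGet?, PySem.List.pyIdx?] at h
  by_contra hlt
  push_neg at hlt
  simp [if_pos (le_trans (by positivity) hlt), if_neg (not_lt.mpr hlt)] at h

-- ===== VERDICT (by name: the statement is the Claim_ definition above) =====
theorem get_numeric_token_spec : Claim_equal_get_numeric_token := by
  intro s i _ hpre
  unfold Pre_get_numeric_token at hpre
  cases hget : PySem.List.pyGet? s.toList i with
  | none => rw [hget] at hpre; simp [Option.any] at hpre
  | some c =>
  rw [hget] at hpre
  simp only [Option.any, Bool.and_eq_true, decide_eq_true_eq] at hpre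
  have hdig : c ∈ pvDigitChars := (mem_pvDigitChars_iff c).mpr hpre
  unfold Spec_get_numeric_token get_numeric_token get_numeric_token_alt
  have hlt : i < (s.toList.length : Int) := pyGet?_some_lt hget
  -- first iteration of A's loop is taken, so the collected list is nonempty
  have hstep : getNumericLoopA s.toList i [] = getNumericLoopA s.toList (i + 1) [c] := by
    rw [getNumericLoopA]; simp only [dif_pos hlt, hget, if_pos hdig, List.nil_append]
  obtain ⟨t, ht, hall⟩ := loopA_prefix s.toList (i + 1) [c]
  have hne : (getNumericLoopA s.toList i []).1 ≠ [] := by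
    rw [hstep, ht]; simp
  have halldig : (getNumericLoopA s.toList i []).1.all
      (fun c => decide ('0' ≤ c) && decide (c ≤ '9')) = true := by
    obtain ⟨h1, h2⟩ := (mem_pvDigitChars_iff c).mp hdig
    rw [hstep, ht]; simp [hall, h1, h2]
  have hconv : pyIntOfDigitStr (getNumericLoopA s.toList i []).1
      = (getNumericLoopA s.toList i []).1.foldl (fun a c => a * 10 + ((c.toNat : Int) - 48)) 0 := by
    rw [pyIntOfDigitStr, if_pos ⟨hne, halldig⟩]
  have hB := loop_agree s.toList i []
  simp only [List.foldl_nil] at hB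
  show (pyIntOfDigitStr (getNumericLoopA s.toList i []).1, (getNumericLoopA s.toList i []).2)
      = getNumericLoopB s.toList i 0
  rw [hB, hconv]
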